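-- pv_equiv track=rewrite | github.com/ProjectPurpura/api-mg | websocket-test-api-mg/main.py | parse_stomp_frame
-- ===== SOURCE A (Python) =====
-- def parse_stomp_frame(message):
--     # Minimal STOMP frame parser
--     if not message:
--         return None, {}, ''
--     parts = message.split('\n\n', 1)
--     header = parts[0]
--     body = parts[1][:-1] if len(parts) > 1 and parts[1].endswith('\0') else (parts[1] if len(parts) > 1 else '')
--     lines = header.split('\n')
--     command = lines[0]
--     headers = {}
--     for line in lines[1:]:
--         if ':' in line:
--             k, v = line.split(':', 1)
--             headers[k.strip()] = v.strip()
--     return command, headers, body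
-- ===== SOURCE B (Python) =====
-- def parse_stomp_frame(message):
--     # Single split on '\n' + one state-machine pass over the lines.
--     if not message:
--         return None, {}, ''
--     lines = message.split('\n')
--     headers = {}
--     in_body = False
--     body_lines = []
--     for line in lines[1:]:
--         if in_body:
--             body_lines.append(line)
--         elif line == '':
--             in_body = True
--         elif ':' in line:
--             k, v = line.split(':', 1)
--             headers[k.strip()] = v.strip()
--     body = '\n'.join(body_lines)
--     if body.endswith('\0'):
--         body = body[:-1]
--     return lines[0], headers, body
-- ===== Notes on version B (the rewrite author's own statement) =====
-- stated objective: alternative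
-- what changed: A splits the message at the first blank-line separator into header/body and then re-splits the header into lines; B splits the whole message once into lines and runs a single state-machine pass over them, switching from header- to body-collection at the first empty line and rejoining the remaining lines as the body.
import Mathlib
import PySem

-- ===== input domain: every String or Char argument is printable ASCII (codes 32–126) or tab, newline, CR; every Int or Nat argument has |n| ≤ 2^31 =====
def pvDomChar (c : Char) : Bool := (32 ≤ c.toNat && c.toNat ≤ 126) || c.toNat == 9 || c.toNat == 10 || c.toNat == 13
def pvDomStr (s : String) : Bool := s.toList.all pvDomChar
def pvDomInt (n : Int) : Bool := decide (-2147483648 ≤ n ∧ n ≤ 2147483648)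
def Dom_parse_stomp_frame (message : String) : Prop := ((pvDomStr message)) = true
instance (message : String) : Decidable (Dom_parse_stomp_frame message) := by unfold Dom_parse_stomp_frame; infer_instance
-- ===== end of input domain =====

-- B replaces A's two-level split (blank-line separator first, then the header into lines)
-- by one split of the whole message into lines and a single state-machine pass over them
-- (alternative decomposition, same cost).

-- ===== PORT A =====
-- A's loop body: 'if ":" in line: k, v = line.split(":", 1); headers[k.strip()] = v.strip()'
def pvHeaderStep (d : PySem.Dict String String) (line : String) : PySem.Dict String String :=
  if PySem.Str.isIn ":" line then
    match (PySem.Str.splitMax? line ":" 1).getD [] with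
    | [k, v] => d.insert (PySem.Str.strip k) (PySem.Str.strip v)
    | _ => d
  else d

def parse_stomp_frame (message : String) : Option String × (List (String × String)) × String :=
  if message = "" then (none, [], "")
  else
    let parts := (PySem.Str.splitMax? message "\n\n" 1).getD []
    let header := parts.headD ""
    let body :=
      if parts.length > 1 && PySem.Str.endswith (parts.getD 1 "") "\x00" then
        PySem.Str.slice (parts.getD 1 "") none (some (-1))
      else if parts.length > 1 then parts.getD 1 "" else ""
    let lines := (PySem.Str.split? header "\n").getD []
    let command := lines.headD ""
    let headers := lines.tail.foldl pvHeaderStep PySem.Dict.empty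
    (some command, headers.items, body)

-- ===== PORT B =====
-- B's loop body: body phase appends the line; a first empty line flips the phase;
-- otherwise a 'k:v' line is recorded (same line handling as A's loop body).
def pvAltStep (st : PySem.Dict String String × Bool × List String) (line : String) :
    PySem.Dict String String × Bool × List String :=
  if st.2.1 then (st.1, true, st.2.2 ++ [line])
  else if line = "" then (st.1, true, st.2.2)
  else if PySem.Str.isIn ":" line then
    match (PySem.Str.splitMax? line ":" 1).getD [] with
    | [k, v] => (st.1.insert (PySem.Str.strip k) (PySem.Str.strip v), false, st.2.2)
    | _ => st
  else st

def parse_stomp_frame_alt (message : String) : Option String × (List (String × String)) × String :=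
  if message = "" then (none, [], "")
  else
    let lines := (PySem.Str.split? message "\n").getD []
    let st := lines.tail.foldl pvAltStep
      ((PySem.Dict.empty : PySem.Dict String String), false, ([] : List String))
    let body0 := PySem.Str.join "\n" st.2.2
    let body := if PySem.Str.endswith body0 "\x00" then PySem.Str.slice body0 none (some (-1)) else body0
    (some (lines.headD ""), st.1.items, body)

-- ===== PRECONDITION & SPEC =====
def Spec_parse_stomp_frame (message : String) (out : Option String × (List (String × String)) × String) : Prop := out = parse_stomp_frame_alt message
instance (message : String) (out : Option String × (List (String × String)) × String) : Decidable (Spec_parse_stomp_frame message out) := by unfold Spec_parse_stomp_frame; infer_instance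

-- ===== CLAIM (what is proved, stated in full; the proofs are below) =====
def Claim_equal_parse_stomp_frame : Prop := ∀ (message : String), Dom_parse_stomp_frame message → Spec_parse_stomp_frame message (parse_stomp_frame message)

-- ===== LEMMAS AND PROOFS =====

def pvConsHead (x : List Char) : List (List Char) → List (List Char)
  | [] => [x]
  | p :: ps => (x ++ p) :: ps
def pvSplitRec : List Char → List (List Char)
  | [] => [[]]
  | c :: rest => if c = '\n' then [] :: pvSplitRec rest else pvConsHead [c] (pvSplitRec rest)
theorem pvSplitRec_ne_nil (cs : List Char) : pvSplitRec cs ≠ [] := by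
  cases cs with
  | nil => simp [pvSplitRec]
  | cons c rest =>
    simp only [pvSplitRec]; split
    · simp
    · cases h : pvSplitRec rest <;> simp [pvConsHead]

theorem pvSplitOn_go_eq (fuel : Nat) (l cur : List Char) (acc : List (List Char))
    (hf : l.length < fuel) :
    PySem.Chars.splitOn.go ['\n'] fuel l cur acc = acc.reverse ++ pvConsHead cur.reverse (pvSplitRec l) := by
  induction fuel generalizing l cur acc with
  | zero => omega
  | succ n ih =>
    cases l with
    | nil => simp [PySem.Chars.splitOn.go, pvSplitRec, pvConsHead]
    | cons c rest =>
      by_cases hc : c = '\n'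
      · subst hc
        rw [show PySem.Chars.splitOn.go ['\n'] (n+1) ('\n'::rest) cur acc
            = PySem.Chars.splitOn.go ['\n'] n rest [] (cur.reverse :: acc) by
          simp [PySem.Chars.splitOn.go, List.isPrefixOf]]
        rw [ih _ _ _ (by simp at hf ⊢; omega)]
        obtain ⟨p, ps, hp⟩ : ∃ p ps, pvSplitRec rest = p :: ps := by
          cases h : pvSplitRec rest with
          | nil => exact absurd h (pvSplitRec_ne_nil rest)
          | cons p ps => exact ⟨p, ps, rfl⟩
        simp [pvSplitRec, hp, pvConsHead]
      · rw [show PySem.Chars.splitOn.go ['\n'] (n+1) (c::rest) cur acc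
            = PySem.Chars.splitOn.go ['\n'] n rest (c :: cur) acc by
          simp only [PySem.Chars.splitOn.go, List.isPrefixOf]
          rw [if_neg]
          simp only [List.isPrefixOf, Bool.and_eq_true, beq_iff_eq, List.isPrefixOf_nil_left, and_true]
          exact fun h => hc h.symm]
        rw [ih _ _ _ (by simp at hf ⊢; omega)]
        obtain ⟨p, ps, hp⟩ : ∃ p ps, pvSplitRec rest = p :: ps := by
          cases h : pvSplitRec rest with
          | nil => exact absurd h (pvSplitRec_ne_nil rest)
          | cons p ps => exact ⟨p, ps, rfl⟩
        simp [pvSplitRec, hp, pvConsHead, hc]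

theorem pvSplitOn_eq (cs : List Char) : PySem.Chars.splitOn cs ['\n'] = pvSplitRec cs := by
  rw [PySem.Chars.splitOn, pvSplitOn_go_eq _ _ _ _ (by omega)]
  cases h : pvSplitRec cs with
  | nil => exact absurd h (pvSplitRec_ne_nil cs)
  | cons p ps => simp [pvConsHead]

def pvSplitOnce : List Char → List Char × Option (List Char)
  | [] => ([], none)
  | [c] => ([c], none)
  | c1 :: c2 :: rest =>
    if c1 = '\n' ∧ c2 = '\n' then ([], some rest)
    else ((c1 :: (pvSplitOnce (c2 :: rest)).1), (pvSplitOnce (c2 :: rest)).2)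

theorem pvGoMax_zero (sep : List Char) (fuel : Nat) (l cur : List Char) (acc : List (List Char)) :
    PySem.Chars.splitOnMax.go sep fuel 0 l cur acc = ((cur.reverse ++ l) :: acc).reverse := by
  cases fuel with
  | zero => simp [PySem.Chars.splitOnMax.go]
  | succ n =>
    cases l with
    | nil => simp [PySem.Chars.splitOnMax.go]
    | cons c rest => simp [PySem.Chars.splitOnMax.go]

theorem pvSplitOnMax_go_eq (fuel : Nat) (l cur : List Char) (acc : List (List Char))
    (hf : l.length < fuel) :
    PySem.Chars.splitOnMax.go ['\n', '\n'] fuel 1 l cur acc =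
      acc.reverse ++ (match pvSplitOnce l with
        | (h, none) => [cur.reverse ++ h]
        | (h, some b) => [cur.reverse ++ h, b]) := by
  induction fuel generalizing l cur acc with
  | zero => omega
  | succ n ih =>
    match l with
    | [] => simp [PySem.Chars.splitOnMax.go, pvSplitOnce]
    | [c] =>
      have h1 : PySem.Chars.splitOnMax.go ['\n','\n'] (n+1) 1 [c] cur acc
          = PySem.Chars.splitOnMax.go ['\n','\n'] n 1 [] (c :: cur) acc := by
        simp [PySem.Chars.splitOnMax.go, List.isPrefixOf]
      rw [h1]
      cases n with
      | zero => simp at hf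
      | succ m => simp [PySem.Chars.splitOnMax.go, pvSplitOnce]
    | c1 :: c2 :: rest =>
      by_cases hc : c1 = '\n' ∧ c2 = '\n'
      · obtain ⟨rfl, rfl⟩ := hc
        have h1 : PySem.Chars.splitOnMax.go ['\n','\n'] (n+1) 1 ('\n'::'\n'::rest) cur acc
            = PySem.Chars.splitOnMax.go ['\n','\n'] n 0 rest [] (cur.reverse :: acc) := by
          simp [PySem.Chars.splitOnMax.go, List.isPrefixOf]
        rw [h1, pvGoMax_zero]
        simp [pvSplitOnce]
      · have h1 : PySem.Chars.splitOnMax.go ['\n','\n'] (n+1) 1 (c1::c2::rest) cur acc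
            = PySem.Chars.splitOnMax.go ['\n','\n'] n 1 (c2::rest) (c1 :: cur) acc := by
          simp only [PySem.Chars.splitOnMax.go]
          rw [if_neg (by omega), if_neg]
          simp only [List.isPrefixOf, Bool.and_eq_true, beq_iff_eq]
          intro h
          exact hc ⟨h.1.symm, h.2.1.symm⟩
        rw [h1, ih _ _ _ (by simp at hf ⊢; omega)]
        rw [show pvSplitOnce (c1::c2::rest)
            = ((c1 :: (pvSplitOnce (c2 :: rest)).1), (pvSplitOnce (c2 :: rest)).2) by
          rw [pvSplitOnce]; exact if_neg hc]
        rcases e : pvSplitOnce (c2 :: rest) with ⟨h, b⟩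
        cases b <;> simp

theorem pvSplitOnMax_eq (cs : List Char) :
    PySem.Chars.splitOnMax cs ['\n', '\n'] 1 =
      (match pvSplitOnce cs with
        | (h, none) => [h]
        | (h, some b) => [h, b]) := by
  rw [PySem.Chars.splitOnMax, if_neg (by norm_num)]
  rw [show (1 : Int).toNat = 1 from rfl, pvSplitOnMax_go_eq _ _ _ _ (by omega)]
  rcases e : pvSplitOnce cs with ⟨h, b⟩
  cases b <;> simp

theorem pvSplitOnce_none (cs : List Char) (h : List Char) (e : pvSplitOnce cs = (h, none)) : h = cs := by
  fun_induction pvSplitOnce cs generalizing h with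
  | case1 => simp_all
  | case2 => simp_all
  | case3 c1 c2 rest hc => simp_all
  | case4 c1 c2 rest hc ih =>
    rcases e2 : pvSplitOnce (c2 :: rest) with ⟨h', b'⟩
    rw [e2] at e
    cases b' with
    | none =>
      simp at e
      rw [← e, ih h' e2]
    | some b => simp at e

theorem pvSplitOnce_some (cs : List Char) (h b : List Char) (e : pvSplitOnce cs = (h, some b)) :
    cs = h ++ '\n' :: '\n' :: b := by
  fun_induction pvSplitOnce cs generalizing h b with
  | case1 => simp_all
  | case2 => simp_all
  | case3 c1 c2 rest hc =>
    obtain ⟨rfl, rfl⟩ := hc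
    simp at e
    simp [← e.1, ← e.2]
  | case4 c1 c2 rest hc ih =>
    rcases e2 : pvSplitOnce (c2 :: rest) with ⟨h', b'⟩
    rw [e2] at e
    cases b' with
    | none => simp at e
    | some bb =>
      simp at e
      obtain ⟨e1, rfl⟩ := e
      rw [← e1]
      simpa using ih _ _ e2

theorem pvSplitRec_append (x y : List Char) :
    pvSplitRec (x ++ '\n' :: y) = pvSplitRec x ++ pvSplitRec y := by
  induction x with
  | nil => simp [pvSplitRec]
  | cons c rest ih =>
    by_cases hc : c = '\n'
    · subst hc; simp [pvSplitRec, ih]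
    · simp only [List.cons_append, pvSplitRec, if_neg hc, ih]
      cases h : pvSplitRec rest with
      | nil => exact absurd h (pvSplitRec_ne_nil rest)
      | cons p ps => simp [pvConsHead]

theorem pvIntercalate_cons (sep : List Char) (c : Char) (p : List Char) (ps : List (List Char)) :
    sep.intercalate ((c :: p) :: ps) = c :: sep.intercalate (p :: ps) := by
  cases ps <;> simp [List.intercalate]

theorem pvIntercalate_splitRec (b : List Char) : ['\n'].intercalate (pvSplitRec b) = b := by
  induction b with
  | nil => simp [pvSplitRec, List.intercalate]
  | cons c rest ih =>
    by_cases hc : c = '\n'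
    · subst hc
      simp only [pvSplitRec]
      cases h : pvSplitRec rest with
      | nil => exact absurd h (pvSplitRec_ne_nil rest)
      | cons p ps =>
        rw [h] at ih
        simp [List.intercalate, ← ih]
    · simp only [pvSplitRec, if_neg hc]
      cases h : pvSplitRec rest with
      | nil => exact absurd h (pvSplitRec_ne_nil rest)
      | cons p ps =>
        rw [h] at ih
        simp [pvConsHead, pvIntercalate_cons, ih]

theorem pvSplitRec_head_cons (c : Char) (t : List Char) (hc : c ≠ '\n') :
    ∃ p ps, pvSplitRec (c :: t) = (c :: p) :: ps := by
  simp only [pvSplitRec, if_neg hc]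
  cases h : pvSplitRec t with
  | nil => exact absurd h (pvSplitRec_ne_nil t)
  | cons p ps => exact ⟨p, ps, by simp [pvConsHead]⟩

theorem pvSplitRec_cons_nl (t : List Char) : pvSplitRec ('\n' :: t) = [] :: pvSplitRec t := by
  rw [pvSplitRec, if_pos rfl]

theorem pvSplitRec_cons (c : Char) (t : List Char) (hc : c ≠ '\n') :
    pvSplitRec (c :: t) = pvConsHead [c] (pvSplitRec t) := by
  rw [pvSplitRec, if_neg hc]

theorem pvGood_some (cs h b : List Char) (e : pvSplitOnce cs = (h, some b)) :
    [] ∉ (pvSplitRec h).tail := by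
  fun_induction pvSplitOnce cs generalizing h b with
  | case1 => simp_all
  | case2 => simp_all
  | case3 c1 c2 rest hc =>
    simp at e
    obtain ⟨rfl, rfl⟩ := e
    simp [pvSplitRec]
  | case4 c1 c2 rest hc ih =>
    rcases e2 : pvSplitOnce (c2 :: rest) with ⟨h', b'⟩
    rw [e2] at e
    cases b' with
    | none => simp at e
    | some bb =>
      simp at e
      obtain ⟨e1, rfl⟩ := e
      subst e1
      have iht := ih _ _ e2
      by_cases hc1 : c1 = '\n'
      · subst hc1
        have hc2 : c2 ≠ '\n' := fun hh => hc ⟨rfl, hh⟩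
        have hs := pvSplitOnce_some _ _ _ e2
        obtain ⟨h'', rfl⟩ : ∃ t, h' = c2 :: t := by
          cases h' with
          | nil => simp at hs; exact absurd hs.1 hc2
          | cons a t => simp at hs; exact ⟨t, by rw [hs.1]⟩
        obtain ⟨p, ps, hp⟩ := pvSplitRec_head_cons c2 h'' hc2
        rw [pvSplitRec_cons_nl, List.tail_cons, hp]
        rw [hp, List.tail_cons] at iht
        simpa using iht
      · obtain ⟨p, ps, hp⟩ := pvSplitRec_head_cons c1 h' hc1
        rw [pvSplitRec_cons _ _ hc1]
        cases hr : pvSplitRec h' with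
        | nil => exact absurd hr (pvSplitRec_ne_nil h')
        | cons q qs =>
          rw [hr] at iht
          simpa [pvConsHead] using iht

theorem pvGood_none (cs : List Char) (h : List Char) (e : pvSplitOnce cs = (h, none)) :
    [] ∉ (pvSplitRec cs).tail.dropLast := by
  fun_induction pvSplitOnce cs generalizing h with
  | case1 => simp [pvSplitRec]
  | case2 c =>
    by_cases hc : c = '\n'
    · subst hc; simp [pvSplitRec]
    · simp [pvSplitRec, if_neg hc, pvConsHead]
  | case3 c1 c2 rest hc => simp at e
  | case4 c1 c2 rest hc ih =>
    rcases e2 : pvSplitOnce (c2 :: rest) with ⟨h', b'⟩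
    rw [e2] at e
    cases b' with
    | some bb => simp at e
    | none =>
      have iht := ih _ e2
      by_cases hc1 : c1 = '\n'
      · subst hc1
        have hc2 : c2 ≠ '\n' := fun hh => hc ⟨rfl, hh⟩
        obtain ⟨p, ps, hp⟩ := pvSplitRec_head_cons c2 rest hc2
        rw [pvSplitRec_cons_nl, List.tail_cons, hp]
        rw [hp, List.tail_cons] at iht
        cases ps with
        | nil => simp
        | cons q qs =>
          rw [List.dropLast_cons₂]
          simp only [List.mem_cons, not_or]
          exact ⟨by simp, by simpa using iht⟩
      · rw [pvSplitRec_cons _ _ hc1]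
        cases hr : pvSplitRec (c2 :: rest) with
        | nil => exact absurd hr (pvSplitRec_ne_nil _)
        | cons q qs =>
          rw [hr] at iht
          simpa [pvConsHead] using iht


theorem pvAltStep_ne (d : PySem.Dict String String) (bl : List String) (l : String) (hl : l ≠ "") :
    pvAltStep (d, false, bl) l = (pvHeaderStep d l, false, bl) := by
  simp only [pvAltStep, pvHeaderStep, if_neg hl]
  simp only [Bool.false_eq_true, if_false]
  split
  · split <;> rfl
  · rfl

theorem pvB_headers (ls : List String) (d : PySem.Dict String String) (bl : List String)
    (hne : ∀ l ∈ ls, l ≠ "") :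
    ls.foldl pvAltStep (d, false, bl) = (ls.foldl pvHeaderStep d, false, bl) := by
  induction ls generalizing d with
  | nil => rfl
  | cons l ls ih =>
    rw [List.foldl_cons, List.foldl_cons, pvAltStep_ne _ _ _ (hne l (by simp))]
    exact ih _ (fun x hx => hne x (by simp [hx]))

theorem pvB_body (ls : List String) (d : PySem.Dict String String) (bl : List String) :
    ls.foldl pvAltStep (d, true, bl) = (d, true, bl ++ ls) := by
  induction ls generalizing bl with
  | nil => simp
  | cons l ls ih => rw [List.foldl_cons, show pvAltStep (d, true, bl) l = (d, true, bl ++ [l]) from rfl, ih]; simp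

theorem pvAltStep_empty (d : PySem.Dict String String) (bl : List String) :
    pvAltStep (d, false, bl) "" = (d, true, bl) := by rfl

theorem pvHeaderStep_empty (d : PySem.Dict String String) : pvHeaderStep d "" = d := by
  rw [pvHeaderStep, if_neg (by decide)]

theorem pvOfList_empty_iff (l : List Char) : String.ofList l = "" ↔ l = [] := by
  constructor
  · intro h; have := congrArg String.toList h; simpa using this
  · rintro rfl; rfl

theorem pvSplit2_eq (message : String) :
    (PySem.Str.splitMax? message "\n\n" 1).getD [] =
      List.map String.ofList (match pvSplitOnce message.toList with
        | (h, none) => [h]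
        | (h, some b) => [h, b]) := by
  rw [PySem.Str.splitMax?, show ("\n\n" : String).toList = ['\n','\n'] from rfl,
    PySem.Chars.splitMax?, if_neg (by simp), pvSplitOnMax_eq]
  rcases pvSplitOnce message.toList with ⟨h, b⟩
  cases b <;> rfl

theorem pvSplit1_eq (s : String) :
    (PySem.Str.split? s "\n").getD [] = List.map String.ofList (pvSplitRec s.toList) := by
  rw [PySem.Str.split?, show ("\n" : String).toList = ['\n'] from rfl,
    PySem.Chars.split?, if_neg (by simp), pvSplitOn_eq]
  rfl

theorem pvJoin_eq (bl : List Char) :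
    PySem.Str.join "\n" (List.map String.ofList (pvSplitRec bl)) = String.ofList bl := by
  have ht : (PySem.Str.join "\n" (List.map String.ofList (pvSplitRec bl))).toList = bl := by
    rw [PySem.Str.toList_join, show ("\n" : String).toList = ['\n'] from rfl]
    rw [show List.map String.toList (List.map String.ofList (pvSplitRec bl)) = pvSplitRec bl by
      rw [List.map_map]
      rw [show String.toList ∘ String.ofList = id by funext x; simp, List.map_id]]
    exact pvIntercalate_splitRec bl
  rw [← String.ofList_toList (s := PySem.Str.join "\n" (List.map String.ofList (pvSplitRec bl))), ht]

theorem pvMain (message : String) : parse_stomp_frame message = parse_stomp_frame_alt message := by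
  by_cases hm : message = ""
  · rw [parse_stomp_frame, parse_stomp_frame_alt, if_pos hm, if_pos hm]
  · rw [parse_stomp_frame, parse_stomp_frame_alt, if_neg hm, if_neg hm]
    rcases e : pvSplitOnce message.toList with ⟨h, b?⟩
    cases b? with
    | none =>
      have hh : h = message.toList := pvSplitOnce_none _ _ e
      subst hh
      rw [pvSplit2_eq, e]
      simp only [List.map_cons, List.map_nil, List.headD_cons, List.length_cons,
        List.length_nil, List.getD, String.ofList_toList]
      rw [pvSplit1_eq]
      obtain ⟨p, ps, hp⟩ : ∃ p ps, pvSplitRec message.toList = p :: ps := by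
        cases hq : pvSplitRec message.toList with
        | nil => exact absurd hq (pvSplitRec_ne_nil _)
        | cons p ps => exact ⟨p, ps, rfl⟩
      rw [hp]
      simp only [List.map_cons, List.tail_cons, List.headD_cons]
      have hdl : [] ∉ ps.dropLast := by
        have := pvGood_none _ _ e
        rw [hp] at this; simpa using this
      by_cases hmem : [] ∈ ps
      · -- a single trailing empty line
        have hps : ps ≠ [] := by rintro rfl; simp at hmem
        have hlast : ps.getLast hps = [] := by
          have hx2 := hmem
          conv at hx2 => rw [← List.dropLast_append_getLast hps]
          rcases List.mem_append.1 hx2 with hin | hl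
          · exact absurd hin hdl
          · simpa using (List.mem_singleton.mp hl).symm
        have hsplit : ps = ps.dropLast ++ [[]] := by
          conv_lhs => rw [← List.dropLast_append_getLast hps]
          rw [hlast]
        rw [hsplit, List.map_append, List.foldl_append, List.foldl_append]
        rw [pvB_headers _ _ _ (by
          intro l hl hl0
          rw [List.mem_map] at hl
          obtain ⟨x, hx, rfl⟩ := hl
          rw [pvOfList_empty_iff] at hl0
          exact hdl (hl0 ▸ hx))]
        simp only [List.map_cons, List.map_nil, List.foldl_cons, List.foldl_nil]
        rw [show String.ofList [] = "" from rfl, pvAltStep_empty, pvHeaderStep_empty]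
        simp [PySem.Str.join, PySem.Chars.join, List.intercalate, PySem.Str.endswith,
          PySem.Chars.endswith]
      · rw [pvB_headers _ _ _ (by
          intro l hl hl0
          rw [List.mem_map] at hl
          obtain ⟨x, hx, rfl⟩ := hl
          rw [pvOfList_empty_iff] at hl0
          exact hmem (hl0 ▸ hx))]
        simp [PySem.Str.join, PySem.Chars.join, List.intercalate, PySem.Str.endswith,
          PySem.Chars.endswith]
    | some b =>
      have hcs : message.toList = h ++ '\n' :: '\n' :: b := pvSplitOnce_some _ _ _ e
      have hrec : pvSplitRec message.toList = pvSplitRec h ++ [] :: pvSplitRec b := by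
        rw [hcs, pvSplitRec_append, pvSplitRec_cons_nl]
      rw [pvSplit2_eq, e]
      simp only [List.map_cons, List.map_nil, List.headD_cons, List.length_cons,
        List.length_nil, List.getD]
      rw [pvSplit1_eq, pvSplit1_eq, String.toList_ofList, hrec]
      obtain ⟨p, ps, hp⟩ : ∃ p ps, pvSplitRec h = p :: ps := by
        cases hq : pvSplitRec h with
        | nil => exact absurd hq (pvSplitRec_ne_nil _)
        | cons p ps => exact ⟨p, ps, rfl⟩
      rw [hp]
      simp only [List.cons_append, List.map_cons, List.map_append, List.tail_cons,
        List.headD_cons, List.foldl_append]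
      rw [pvB_headers _ _ _ (by
        intro l hl hl0
        rw [List.mem_map] at hl
        obtain ⟨x, hx, rfl⟩ := hl
        rw [pvOfList_empty_iff] at hl0
        have := pvGood_some _ _ _ e
        rw [hp] at this
        exact this (by simpa [hl0] using hx))]
      simp only [List.foldl_cons]
      rw [show String.ofList [] = "" from rfl, pvAltStep_empty, pvB_body]
      simp only [List.nil_append]
      rw [pvJoin_eq]
      norm_num

-- ===== VERDICT (by name: the statement is the Claim_ definition above) =====
theorem parse_stomp_frame_spec : Claim_equal_parse_stomp_frame := by
  intro message _
  unfold Spec_parse_stomp_frame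
  exact pvMain message
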